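-- pv_equiv track=rewrite | github.com/shaswataddas/HackerRank | Algorithms/Greedy/Marc's_Cakewalk.py | marcsCakewalk
-- ===== SOURCE A (Python) =====
-- def marcsCakewalk(calorie):
--     miles=0
--     calorie.sort(reverse = True)
--     p=0
--     for i in calorie:
--         miles=miles+((2**p)*i)
--         p+=1
--     return miles
-- ===== SOURCE B (Python) =====
-- def marcsCakewalk(calorie):
--     calorie.sort(reverse=True)
--     total = 0
--     for c in reversed(calorie):
--         total = total * 2 + c
--     return total
-- ===== Notes on version B (the rewrite author's own statement) =====
-- stated objective: faster
-- what changed: Replaces the miles/p accumulator with explicit powers of 2 by a Horner-style pass over the reversed sorted list (total = total*2 + c), eliminating big-int exponentiation.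
import Mathlib
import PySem

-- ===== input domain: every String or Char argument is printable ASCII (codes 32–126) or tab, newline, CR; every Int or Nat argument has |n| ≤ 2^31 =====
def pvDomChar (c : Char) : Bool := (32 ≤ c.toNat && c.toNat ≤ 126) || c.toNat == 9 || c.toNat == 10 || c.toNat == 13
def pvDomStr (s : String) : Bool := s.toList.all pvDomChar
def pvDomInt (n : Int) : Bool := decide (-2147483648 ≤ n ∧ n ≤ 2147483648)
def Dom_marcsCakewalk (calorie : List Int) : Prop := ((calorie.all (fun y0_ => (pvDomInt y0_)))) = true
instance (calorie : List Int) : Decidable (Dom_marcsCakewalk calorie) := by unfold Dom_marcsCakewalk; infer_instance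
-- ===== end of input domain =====

-- B computes the same weighted sum by a Horner pass over the reversed sorted list (no powers of 2);
-- both versions sort the argument descending in place in Python — equivalence here is about the return value.

-- ===== PORT A =====
-- miles/p accumulator over the descending-sorted list, adding 2^p * i each step
def marcsCakewalk (calorie : List Int) : Int :=
  let s := PySem.List.sorted calorie (fun x => x) true
  (s.foldl (fun st i => (st.1 + 2 ^ st.2 * i, st.2 + 1)) ((0 : Int), (0 : Nat))).1

-- ===== PORT B =====
-- Horner accumulation total = total*2 + c over reversed(sorted list)
def marcsCakewalk_alt (calorie : List Int) : Int :=
  let s := PySem.List.sorted calorie (fun x => x) true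
  s.reverse.foldl (fun t c => t * 2 + c) 0

-- ===== PRECONDITION & SPEC =====
def Spec_marcsCakewalk (calorie : List Int) (out : Int) : Prop := out = marcsCakewalk_alt calorie
instance (calorie : List Int) (out : Int) : Decidable (Spec_marcsCakewalk calorie out) := by unfold Spec_marcsCakewalk; infer_instance

-- ===== CLAIM (what is proved, stated in full; the proofs are below) =====
def Claim_equal_marcsCakewalk : Prop := ∀ (calorie : List Int), Dom_marcsCakewalk calorie → Spec_marcsCakewalk calorie (marcsCakewalk calorie)

-- ===== LEMMAS AND PROOFS =====

-- B's Horner value of a list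
def pvHorner (l : List Int) : Int := l.reverse.foldl (fun t c => t * 2 + c) 0

theorem pvHorner_cons (x : Int) (xs : List Int) :
    pvHorner (x :: xs) = 2 * pvHorner xs + x := by
  simp [pvHorner, List.foldl_append]
  ring

theorem pvFoldA_eq (l : List Int) (m : Int) (p : Nat) :
    (l.foldl (fun st i => (st.1 + 2 ^ st.2 * i, st.2 + 1)) (m, p)).1
      = m + 2 ^ p * pvHorner l := by
  induction l generalizing m p with
  | nil => simp [pvHorner]
  | cons x xs ih =>
      simp only [List.foldl_cons, ih, pvHorner_cons]
      ring

-- ===== VERDICT (by name: the statement is the Claim_ definition above) =====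
theorem marcsCakewalk_spec : Claim_equal_marcsCakewalk := by
  intro calorie _
  unfold Spec_marcsCakewalk marcsCakewalk marcsCakewalk_alt
  simp only [pvFoldA_eq]
  simp [pvHorner]
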